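-- pv_equiv track=rewrite | github.com/sunuanuan/suncnv | suncnv.py | adjacent_seeds
-- ===== SOURCE A (Python) =====
-- def adjacent_seeds(seeds: list, max_gap_count: int) -> list:
--     segments = []
--     start = 0
--     end = start + 1
--     while end < len(seeds):
--         if seeds[end] - seeds[end - 1] > max_gap_count + 1:
--             if end - start > 1:
--                 segments.append((start, end - 1))
--             start = end
--             end = start + 1
--         else:
--             end += 1
--     return segments
-- ===== SOURCE B (Python) =====
-- def adjacent_seeds(seeds: list, max_gap_count: int) -> list:
--     breaks = [i for i in range(1, len(seeds)) if seeds[i] - seeds[i - 1] > max_gap_count + 1]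
--     segments = []
--     prev = 0
--     for b in breaks:
--         if b - prev > 1:
--             segments.append((prev, b - 1))
--         prev = b
--     return segments
-- ===== Notes on version B (the rewrite author's own statement) =====
-- stated objective: alternative
-- what changed: Two-phase decomposition: first collect all break positions in one comprehension, then emit segments by folding over the break list with a 'prev' accumulator, instead of A's single while-loop with start/end cursor arithmetic.
import Mathlib
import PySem

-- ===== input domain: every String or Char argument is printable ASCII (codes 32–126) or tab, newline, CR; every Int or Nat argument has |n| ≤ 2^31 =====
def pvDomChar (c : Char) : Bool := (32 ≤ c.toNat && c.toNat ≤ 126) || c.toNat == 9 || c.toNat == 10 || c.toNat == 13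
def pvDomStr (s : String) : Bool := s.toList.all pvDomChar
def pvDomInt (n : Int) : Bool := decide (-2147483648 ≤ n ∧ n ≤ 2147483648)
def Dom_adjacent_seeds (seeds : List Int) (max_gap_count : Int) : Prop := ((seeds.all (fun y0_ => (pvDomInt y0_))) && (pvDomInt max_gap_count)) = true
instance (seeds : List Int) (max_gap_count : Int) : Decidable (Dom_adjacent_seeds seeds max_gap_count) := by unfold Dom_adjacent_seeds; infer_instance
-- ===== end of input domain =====

-- B separates break-detection from segment-emission (one comprehension + one fold) instead of A's
-- cursor while-loop; same O(n) cost, different decomposition ("alternative").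


-- ===== PORT A =====
-- A's while-loop: 'end' advances by 1 each iteration (both branches), so we recurse on
-- seeds.length - e. Indices are always in range at call sites (1 ≤ e < len), so getD is exact.
def adjLoopA (seeds : List Int) (max_gap_count : Int) (segments : List (Int × Int))
    (start e : Nat) : List (Int × Int) :=
  if _h : e < seeds.length then
    if seeds.getD e 0 - seeds.getD (e - 1) 0 > max_gap_count + 1 then
      adjLoopA seeds max_gap_count
        (if e - start > 1 then segments ++ [((start : Int), (e : Int) - 1)] else segments)
        e (e + 1)
    else
      adjLoopA seeds max_gap_count segments start (e + 1)
  else segments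
termination_by seeds.length - e

def adjacent_seeds (seeds : List Int) (max_gap_count : Int) : List (Int × Int) :=
  adjLoopA seeds max_gap_count [] 0 1

-- ===== PORT B =====
-- range(1, len(seeds)) ported as List.range' 1 (len - 1); the fold carries (segments, prev).
def adjacent_seeds_alt (seeds : List Int) (max_gap_count : Int) : List (Int × Int) :=
  let breaks := (List.range' 1 (seeds.length - 1)).filter
    (fun i => seeds.getD i 0 - seeds.getD (i - 1) 0 > max_gap_count + 1)
  (breaks.foldl
    (fun (acc : List (Int × Int) × Nat) b =>
      ((if b - acc.2 > 1 then acc.1 ++ [((acc.2 : Int), (b : Int) - 1)] else acc.1), b))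
    ([], 0)).1

-- ===== PRECONDITION & SPEC =====
def Spec_adjacent_seeds (seeds : List Int) (max_gap_count : Int) (out : List (Int × Int)) : Prop := out = adjacent_seeds_alt seeds max_gap_count
instance (seeds : List Int) (max_gap_count : Int) (out : List (Int × Int)) : Decidable (Spec_adjacent_seeds seeds max_gap_count out) := by unfold Spec_adjacent_seeds; infer_instance

-- ===== CLAIM (what is proved, stated in full; the proofs are below) =====
def Claim_equal_adjacent_seeds : Prop := ∀ (seeds : List Int) (max_gap_count : Int), Dom_adjacent_seeds seeds max_gap_count → Spec_adjacent_seeds seeds max_gap_count (adjacent_seeds seeds max_gap_count)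

-- ===== LEMMAS AND PROOFS =====

-- A's loop from cursor e equals B's fold over the breaks lying in [e, len).
theorem adjLoopA_eq_foldl (seeds : List Int) (mgc : Int) :
    ∀ (n e start : Nat) (segs : List (Int × Int)), seeds.length - e = n →
    adjLoopA seeds mgc segs start e =
      (((List.range' e (seeds.length - e)).filter
          (fun i => seeds.getD i 0 - seeds.getD (i - 1) 0 > mgc + 1)).foldl
        (fun (acc : List (Int × Int) × Nat) b =>
          ((if b - acc.2 > 1 then acc.1 ++ [((acc.2 : Int), (b : Int) - 1)] else acc.1), b))
        (segs, start)).1 := by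
  intro n
  induction n with
  | zero =>
    intro e start segs hn
    have he : ¬ e < seeds.length := by omega
    rw [adjLoopA, hn]
    simp [he]
  | succ m ih =>
    intro e start segs hn
    have he : e < seeds.length := by omega
    have hrange : List.range' e (seeds.length - e) = e :: List.range' (e + 1) (seeds.length - (e + 1)) := by
      have : seeds.length - e = (seeds.length - (e + 1)) + 1 := by omega
      rw [this, List.range'_succ]
    rw [adjLoopA, hrange]
    simp only [he, dif_pos, List.filter_cons]
    by_cases hp : seeds.getD e 0 - seeds.getD (e - 1) 0 > mgc + 1
    · simp only [hp, if_pos, decide_true, List.foldl_cons]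
      exact ih (e + 1) e _ (by omega)
    · simp only [hp, decide_false]
      exact ih (e + 1) start segs (by omega)

-- ===== VERDICT (by name: the statement is the Claim_ definition above) =====
theorem adjacent_seeds_spec : Claim_equal_adjacent_seeds := by
  intro seeds mgc _
  show adjacent_seeds seeds mgc = adjacent_seeds_alt seeds mgc
  unfold adjacent_seeds adjacent_seeds_alt
  rw [adjLoopA_eq_foldl seeds mgc (seeds.length - 1) 1 0 [] rfl]
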